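-- pv_equiv track=rewrite | github.com/meraf00/Competitive-Programming | 0135-candy/0135-candy.py | find_increasing_ranges
-- ===== SOURCE A (Python) =====
-- def find_increasing_ranges(ratings):
--     ranges = []
--     i = 0
--     while i < len(ratings) - 1:
--         current = ratings[i]
--         next = ratings[i + 1]
--
--         if current < next:
--             j = i
--             for j in range(i + 1, len(ratings)):
--                 if j+1>=len(ratings) or ratings[j] >= ratings[j+1]:
--                     break
--             ranges.append((i, j))
--             i = j+1
--             continue
--         i += 1
--
--     return ranges
-- ===== SOURCE B (Python) =====
-- def find_increasing_ranges(ratings):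
--     ranges = []
--     start = None
--     for k in range(1, len(ratings)):
--         if ratings[k - 1] < ratings[k]:
--             if start is None:
--                 start = k - 1
--         elif start is not None:
--             ranges.append((start, k - 1))
--             start = None
--     if start is not None:
--         ranges.append((start, len(ratings) - 1))
--     return ranges
-- ===== Notes on version B (the rewrite author's own statement) =====
-- stated objective: simpler
-- what changed: Replaced A's nested while/for with inner index jumping by a single flat pass over adjacent pairs that maintains an open-run start pointer and flushes the trailing run after the loop.
import Mathlib
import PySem

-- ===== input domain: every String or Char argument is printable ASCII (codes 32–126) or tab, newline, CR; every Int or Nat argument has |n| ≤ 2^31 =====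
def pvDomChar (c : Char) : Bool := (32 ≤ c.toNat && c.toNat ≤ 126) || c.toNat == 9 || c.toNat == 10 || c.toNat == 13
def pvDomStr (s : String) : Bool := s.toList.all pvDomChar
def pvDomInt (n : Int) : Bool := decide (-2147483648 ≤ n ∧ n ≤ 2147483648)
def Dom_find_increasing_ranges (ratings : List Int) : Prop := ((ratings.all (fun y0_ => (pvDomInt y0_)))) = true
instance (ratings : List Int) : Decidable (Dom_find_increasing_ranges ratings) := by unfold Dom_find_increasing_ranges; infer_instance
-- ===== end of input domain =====

-- B replaces A's nested while/for with index jumping by one flat pass over adjacent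
-- pairs keeping an open-run start pointer (objective: simpler).

-- ===== PORT A =====
-- inner 'for j in range(i+1, len(ratings)): if j+1>=len(ratings) or ratings[j] >= ratings[j+1]: break'
-- (the break condition holds at j = len-1, so the scan always stops there at the latest;
--  indices are always in range, so getD is exact for ratings[j])
def findJ_A (r : List Int) (j : Nat) : Nat :=
  if h : j + 1 ≥ r.length ∨ r.getD j 0 ≥ r.getD (j + 1) 0 then j
  else findJ_A r (j + 1)
termination_by r.length - j
decreasing_by push Not at h; omega

-- termination helper for the outer loop (i jumps to findJ_A r (i+1) + 1)
theorem findJ_A_ge (r : List Int) (j : Nat) : j ≤ findJ_A r j := by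
  unfold findJ_A
  split
  · exact le_refl j
  · exact le_trans (Nat.le_succ j) (findJ_A_ge r (j + 1))
termination_by r.length - j
decreasing_by rename_i h; push Not at h; omega

def loopA (r : List Int) (i : Nat) (acc : List (Int × Int)) : List (Int × Int) :=
  if h : i < r.length - 1 then
    if r.getD i 0 < r.getD (i + 1) 0 then
      let j := findJ_A r (i + 1)
      loopA r (j + 1) (acc ++ [((i : Int), (j : Int))])
    else loopA r (i + 1) acc
  else acc
termination_by r.length - i
decreasing_by
  · have := findJ_A_ge r (i + 1); omega
  · omega

def find_increasing_ranges (ratings : List Int) : List (Int × Int) :=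
  loopA ratings 0 []

-- ===== PORT B =====
-- one pass k = 1 .. len-1 over adjacent pairs, carrying (open-run start, ranges so far);
-- indices k-1, k are always in range, so getD is exact for ratings[k-1], ratings[k]
def loopB (r : List Int) (k : Nat) (start : Option Nat) (acc : List (Int × Int)) :
    List (Int × Int) × Option Nat :=
  if _h : k < r.length then
    if r.getD (k - 1) 0 < r.getD k 0 then
      loopB r (k + 1) (some (start.getD (k - 1))) acc
    else
      match start with
      | some s => loopB r (k + 1) none (acc ++ [((s : Int), (k : Int) - 1)])
      | none => loopB r (k + 1) none acc
  else (acc, start)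
termination_by r.length - k

def find_increasing_ranges_alt (ratings : List Int) : List (Int × Int) :=
  match loopB ratings 1 none [] with
  | (acc, none) => acc
  | (acc, some s) => acc ++ [((s : Int), (ratings.length : Int) - 1)]

-- ===== PRECONDITION & SPEC =====
def Spec_find_increasing_ranges (ratings : List Int) (out : List (Int × Int)) : Prop := out = find_increasing_ranges_alt ratings
instance (ratings : List Int) (out : List (Int × Int)) : Decidable (Spec_find_increasing_ranges ratings out) := by unfold Spec_find_increasing_ranges; infer_instance

-- ===== CLAIM (what is proved, stated in full; the proofs are below) =====
def Claim_equal_find_increasing_ranges : Prop := ∀ (ratings : List Int), Dom_find_increasing_ranges ratings → Spec_find_increasing_ranges ratings (find_increasing_ranges ratings)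

-- ===== LEMMAS AND PROOFS =====

-- 'flush': what B's main function does with loopB's final state
def flushB (r : List Int) (p : List (Int × Int) × Option Nat) : List (Int × Int) :=
  match p with
  | (acc, none) => acc
  | (acc, some s) => acc ++ [((s : Int), (r.length : Int) - 1)]

theorem findJ_A_stop (r : List Int) (j : Nat)
    (h : j + 1 ≥ r.length ∨ r.getD j 0 ≥ r.getD (j + 1) 0) : findJ_A r j = j := by
  rw [findJ_A, dif_pos h]

theorem findJ_A_step (r : List Int) (j : Nat)
    (h : ¬(j + 1 ≥ r.length ∨ r.getD j 0 ≥ r.getD (j + 1) 0)) :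
    findJ_A r j = findJ_A r (j + 1) := by
  rw [findJ_A, dif_neg h]

-- combined invariant: B's pass with a closed run mirrors A's outer loop (P), and
-- B's pass inside an open run started at s mirrors A's inner scan findJ_A (Q)
theorem main_inv (r : List Int) : ∀ d : Nat,
    (∀ i acc, r.length - i ≤ d →
      flushB r (loopB r (i + 1) none acc) = loopA r i acc) ∧
    (∀ m s acc, r.length - m ≤ d → m < r.length →
      flushB r (loopB r (m + 1) (some s) acc)
        = loopA r (findJ_A r m + 1) (acc ++ [((s : Int), (findJ_A r m : Int))])) := by
  intro d
  induction d with
  | zero =>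
    constructor
    · intro i acc hd
      rw [loopB, loopA]
      have h1 : ¬ (i + 1 < r.length) := by omega
      have h2 : ¬ (i < r.length - 1) := by omega
      simp [h1, h2, flushB]
    · intro m s acc hd hm; omega
  | succ d ih =>
    constructor
    · -- P
      intro i acc hd
      by_cases hk : i + 1 < r.length
      · rw [loopB]; rw [dif_pos hk]
        have hi : i < r.length - 1 := by omega
        rw [loopA, dif_pos hi]
        by_cases hlt : r.getD ((i + 1) - 1) 0 < r.getD (i + 1) 0
        · have hlt' : r.getD i 0 < r.getD (i + 1) 0 := by simpa using hlt
          rw [if_pos hlt, if_pos hlt']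
          have : (Option.getD (none : Option Nat) ((i + 1) - 1)) = i := by simp
          rw [this]
          exact (ih.2) (i + 1) i acc (by omega) hk
        · have hlt' : ¬ r.getD i 0 < r.getD (i + 1) 0 := by simpa using hlt
          rw [if_neg hlt, if_neg hlt']
          exact (ih.1) (i + 1) acc (by omega)
      · rw [loopB, dif_neg hk, loopA]
        have h2 : ¬ (i < r.length - 1) := by omega
        rw [dif_neg h2]; rfl
    · -- Q
      intro m s acc hd hm
      by_cases hk : m + 1 < r.length
      · rw [loopB, dif_pos hk]
        by_cases hlt : r.getD ((m + 1) - 1) 0 < r.getD (m + 1) 0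
        · rw [if_pos hlt]
          have hj : findJ_A r m = findJ_A r (m + 1) := by
            apply findJ_A_step
            push Not
            constructor
            · omega
            · simpa using hlt
          have : (Option.getD (some s) ((m + 1) - 1)) = s := by simp
          rw [this, hj]
          exact (ih.2) (m + 1) s acc (by omega) hk
        · rw [if_neg hlt]
          have hj : findJ_A r m = m := by
            apply findJ_A_stop
            right
            simpa using not_lt.mp hlt
          rw [hj]
          have hcast : ((m + 1 : Nat) : Int) - 1 = (m : Int) := by push_cast; ring
          rw [hcast]
          exact (ih.1) (m + 1) (acc ++ [((s : Int), (m : Int))]) (by omega)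
      · rw [loopB, dif_neg hk]
        have hm1 : m = r.length - 1 := by omega
        have hj : findJ_A r m = m := findJ_A_stop r m (Or.inl (by omega))
        rw [hj, loopA]
        have h2 : ¬ (m + 1 < r.length - 1) := by omega
        rw [dif_neg h2]
        simp only [flushB]
        have : ((r.length : Int) - 1) = (m : Int) := by omega
        rw [this]

-- ===== VERDICT (by name: the statement is the Claim_ definition above) =====
theorem find_increasing_ranges_spec : Claim_equal_find_increasing_ranges := by
  intro ratings _
  unfold Spec_find_increasing_ranges find_increasing_ranges find_increasing_ranges_alt
  have h := (main_inv ratings ratings.length).1 0 [] (by omega)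
  rw [← h]
  unfold flushB
  rcases loopB ratings 1 none [] with ⟨acc, st⟩
  cases st <;> rfl
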